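-- pv_equiv track=rewrite | github.com/robdevops/finbot | lib/worker.py | doDelta
-- ===== SOURCE A (Python) =====
-- def doDelta(inputList):
--     deltaString = ''
--     inputListFixed = inputList.copy()
--
--     # replace any NoneType to allow delta calculation
--     for idx, absolute in enumerate(inputList):
--         if absolute is None:
--             if idx == 0:
--                 # get the next value that's not None
--                 inputListFixed[idx] = next((x for x in inputList if x is not None), 0)
--             else:
--                 # get the previous value
--                 inputListFixed[idx] = inputListFixed[idx-1]
--
--     deltaList = [j-i for i,j in zip(inputListFixed, inputListFixed[1:])] # python 3.9
--     #deltaList = [y-x for (x,y) in pairwise(inputListFixed)] # python 3.10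
--
--     for idx, delta in enumerate(deltaList):
--         absolute = inputList[idx+1]
--         if absolute is None or (idx == 0 and inputList[0] is None):
--             deltaString = deltaString + '❌'
--         elif delta < 0 and absolute < 0:
--             deltaString = deltaString + '🔻'
--         elif delta < 0 and absolute >= 0:
--             deltaString = deltaString + '🔽'
--         elif delta > 0 and absolute < 0:
--             deltaString = deltaString + '🔺'
--         elif delta > 0 and absolute >= 0:
--             deltaString = deltaString + '🔼'
--         else:
--             deltaString = deltaString + '▪️'
--
--     # fallback if input has missing elements
--     missingfromstart = 3 - len(deltaString) # desired length hard coded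
--     deltaString = ("❌" * missingfromstart) + deltaString
--
--     return deltaString
-- ===== SOURCE B (Python) =====
-- def doDelta(inputList):
--     # single pass: maintain previous filled value; no intermediate fixed/delta lists
--     s = ''
--     if inputList:
--         prev = inputList[0]
--         if prev is None:
--             prev = next((x for x in inputList if x is not None), 0)
--         first0_none = inputList[0] is None
--         for i in range(1, len(inputList)):
--             absolute = inputList[i]
--             cur = prev if absolute is None else absolute
--             delta = cur - prev
--             if absolute is None or (i == 1 and first0_none):
--                 s += '❌'
--             elif delta < 0:
--                 s += '🔻' if absolute < 0 else '🔽'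
--             elif delta > 0:
--                 s += '🔺' if absolute < 0 else '🔼'
--             else:
--                 s += '▪️'
--             prev = cur
--     return '❌' * (3 - len(s)) + s
-- ===== Notes on version B (the rewrite author's own statement) =====
-- stated objective: simpler
-- what changed: Replaces A's three passes (build a None-filled copy via index mutation, build a pairwise delta list, then loop over enumerate(deltaList) re-indexing the original) by one single pass that carries the previous filled value and emits each emoji directly, building no intermediate lists.
import Mathlib
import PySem

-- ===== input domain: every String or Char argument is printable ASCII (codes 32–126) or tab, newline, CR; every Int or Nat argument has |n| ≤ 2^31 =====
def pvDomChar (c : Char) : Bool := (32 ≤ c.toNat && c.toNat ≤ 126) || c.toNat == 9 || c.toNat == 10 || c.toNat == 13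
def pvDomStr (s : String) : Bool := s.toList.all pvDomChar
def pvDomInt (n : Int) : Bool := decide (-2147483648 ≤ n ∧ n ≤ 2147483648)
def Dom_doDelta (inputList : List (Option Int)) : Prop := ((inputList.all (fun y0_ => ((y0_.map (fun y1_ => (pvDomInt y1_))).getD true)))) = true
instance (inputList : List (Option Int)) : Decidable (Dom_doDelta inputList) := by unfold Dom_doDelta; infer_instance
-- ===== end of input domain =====

-- B replaces A's three passes (None-filled copy, pairwise delta list, emoji loop over enumerate) by
-- one pass carrying the previous filled value; objective: simpler (no intermediate lists).

-- ===== PORT A =====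
-- the body of A's first loop ('replace any NoneType'); state = inputListFixed
def doDelta_fixStep (inputList : List (Option Int)) (f : List (Option Int)) (p : Int × Option Int) : List (Option Int) :=
  match p.2 with
  | some _ => f
  | none =>
    if p.1 = 0 then
      -- next((x for x in inputList if x is not None), 0)
      PySem.List.pySetD f p.1 (some ((inputList.findSome? id).getD 0))
    else
      -- inputListFixed[idx-1] (index always in range here, so the default is never used)
      PySem.List.pySetD f p.1 (PySem.List.pyGetD f (p.1 - 1) none)

-- the body of A's second loop; state = deltaString (a Python str, modeled as List Char per PySem)
def doDelta_emoStep (inputList : List (Option Int)) (s : List Char) (p : Int × Int) : List Char :=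
  let absolute := PySem.List.pyGetD inputList (p.1 + 1) none  -- index idx+1 always in range
  if absolute = none ∨ (p.1 = 0 ∧ PySem.List.pyGetD inputList 0 none = none) then s ++ ['❌']
  else if p.2 < 0 ∧ absolute.getD 0 < 0 then s ++ ['🔻']   -- absolute ≠ none in these branches,
  else if p.2 < 0 ∧ 0 ≤ absolute.getD 0 then s ++ ['🔽']   -- so .getD 0 is Python's int value
  else if 0 < p.2 ∧ absolute.getD 0 < 0 then s ++ ['🔺']
  else if 0 < p.2 ∧ 0 ≤ absolute.getD 0 then s ++ ['🔼']
  else s ++ ['▪', '\uFE0F']   -- '▪️' is two code points, as in Python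

def doDelta (inputList : List (Option Int)) : String :=
  let inputListFixed := (PySem.List.enumerate inputList).foldl (doDelta_fixStep inputList) inputList
  -- [j-i for i,j in zip(inputListFixed, inputListFixed[1:])]; every element is some here
  -- (Python ints by this point), so subtraction is on the .getD 0 values
  let deltaList := (inputListFixed.zip (PySem.List.slice inputListFixed (some 1) none)).map
      (fun q => q.2.getD 0 - q.1.getD 0)
  let deltaString := (PySem.List.enumerate deltaList).foldl (doDelta_emoStep inputList) []
  let missingfromstart : Int := 3 - (deltaString.length : Int)
  String.ofList (PySem.List.pyRepeat ['❌'] missingfromstart ++ deltaString)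

-- ===== PORT B =====
-- single pass over the tail, carrying the previous filled value
def doDelta_altLoop (first0None : Bool) (isFirst : Bool) (prev : Int) : List (Option Int) → List Char
  | [] => []
  | a :: rest =>
    let cur := a.getD prev
    let delta := cur - prev
    let c : List Char :=
      if a.isNone || (isFirst && first0None) then ['❌']
      else if delta < 0 then (if a.getD 0 < 0 then ['🔻'] else ['🔽'])
      else if delta > 0 then (if a.getD 0 < 0 then ['🔺'] else ['🔼'])
      else ['▪', '\uFE0F']
    c ++ doDelta_altLoop first0None false cur rest

def doDelta_alt (inputList : List (Option Int)) : String :=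
  let chars : List Char :=
    match inputList with
    | [] => []
    | a0 :: rest =>
      let prev0 : Int := match a0 with
        | some v => v
        | none => (inputList.findSome? id).getD 0
      doDelta_altLoop a0.isNone true prev0 rest
  String.ofList (PySem.List.pyRepeat ['❌'] (3 - (chars.length : Int)) ++ chars)

-- ===== PRECONDITION & SPEC =====
def Spec_doDelta (inputList : List (Option Int)) (out : String) : Prop := out = doDelta_alt inputList
instance (inputList : List (Option Int)) (out : String) : Decidable (Spec_doDelta inputList out) := by unfold Spec_doDelta; infer_instance

-- ===== CLAIM (what is proved, stated in full; the proofs are below) =====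
def Claim_equal_doDelta : Prop := ∀ (inputList : List (Option Int)), Dom_doDelta inputList → Spec_doDelta inputList (doDelta inputList)

-- ===== LEMMAS AND PROOFS =====

-- the filled values A's first loop produces: position k+1 holds inputList[k+1] if not None, else the previous filled value
def fixRec (prev : Int) : List (Option Int) → List Int
  | [] => []
  | a :: r => (a.getD prev) :: fixRec (a.getD prev) r

-- pairwise differences
def deltaOf (F : List Int) : List Int := (F.zip F.tail).map (fun q => q.2 - q.1)

lemma getD_append_cons {α : Type} (P : List α) (y : α) (t : List α) (d : α) :
    (P ++ y :: t).getD P.length d = y := by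
  simp [List.getD]

lemma set_append_cons {α : Type} (P : List α) (y v : α) (t : List α) :
    (P ++ y :: t).set P.length v = P ++ v :: t := by
  induction P with
  | nil => simp
  | cons x xs ih => simp [ih]

lemma fixLoop_eq (l : List (Option Int)) (rest : List (Option Int)) :
    ∀ (Q : List Int) (prev : Int),
    (PySem.List.enumerate rest ((Q.length : Int) + 1)).foldl (doDelta_fixStep l)
        ((Q ++ [prev]).map some ++ rest)
    = ((Q ++ [prev]) ++ fixRec prev rest).map some := by
  induction rest with
  | nil => intro Q prev; simp [PySem.List.enumerate, fixRec]
  | cons a r ih =>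
    intro Q prev
    rw [PySem.List.enumerate_cons]
    cases a with
    | some v =>
      simp only [List.foldl_cons, doDelta_fixStep]
      have h1 : (Q ++ [prev]).map some ++ some v :: r
          = ((Q ++ [prev]) ++ [v]).map some ++ r := by simp
      have h2 : ((Q.length : Int) + 1) + 1 = (((Q ++ [prev]).length : Int) + 1) := by
        simp
      rw [h1, h2, ih (Q ++ [prev]) v]
      simp [fixRec]
    | none =>
      simp only [List.foldl_cons, doDelta_fixStep]
      have hne : ¬ ((Q.length : Int) + 1 = 0) := by positivity
      rw [if_neg hne]
      have hidx : (Q.length : Int) + 1 - 1 = ((Q.length : Nat) : Int) := by ring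
      have hget : PySem.List.pyGetD ((Q ++ [prev]).map some ++ (none :: r)) ((Q.length : Int) + 1 - 1) none = some prev := by
        rw [hidx, PySem.List.pyGetD_natCast]
        have : (Q ++ [prev]).map some ++ (none :: r) = Q.map some ++ (some prev :: (none :: r)) := by simp
        rw [this]
        have := getD_append_cons (Q.map some) (some prev) (none :: r) (none : Option Int)
        simpa using this
      rw [hget]
      have hset : PySem.List.pySetD ((Q ++ [prev]).map some ++ (none :: r)) ((Q.length : Int) + 1) (some prev)
          = ((Q ++ [prev]) ++ [prev]).map some ++ r := by
        have hc : ((Q.length : Int) + 1) = (((Q.length + 1 : Nat)) : Int) := by push_cast; ring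
        rw [hc, PySem.List.pySetD_natCast]
        have : (Q ++ [prev]).map some ++ (none :: r) = ((Q ++ [prev]).map some) ++ (none :: r) := rfl
        have hl : ((Q ++ [prev]).map some).length = Q.length + 1 := by simp
        rw [← hl, set_append_cons]
        simp
      rw [hset]
      have h2 : ((Q.length : Int) + 1) + 1 = (((Q ++ [prev]).length : Int) + 1) := by
        simp
      rw [h2, ih (Q ++ [prev]) prev]
      simp [fixRec]

-- the first filled value
def fix0 (l : List (Option Int)) : Int :=
  match l with
  | [] => 0
  | a0 :: _ =>
    match a0 with
    | some v => v
    | none => (l.findSome? id).getD 0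

lemma fixed_eq (a0 : Option Int) (rest : List (Option Int)) :
    (PySem.List.enumerate (a0 :: rest)).foldl (doDelta_fixStep (a0 :: rest)) (a0 :: rest)
    = (fix0 (a0 :: rest) :: fixRec (fix0 (a0 :: rest)) rest).map some := by
  rw [PySem.List.enumerate_cons, List.foldl_cons]
  simp only [zero_add]
  cases a0 with
  | some v =>
    have hstep : doDelta_fixStep (some v :: rest) (some v :: rest) (0, some v) = some v :: rest := rfl
    rw [hstep]
    have := fixLoop_eq (some v :: rest) rest [] v
    simp only [List.nil_append, List.length_nil, Nat.cast_zero, zero_add, List.map_cons,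
      List.map_nil, List.singleton_append] at this
    rw [this]
    simp [fix0]
  | none =>
    have hstep : doDelta_fixStep (none :: rest) (none :: rest) (0, none)
        = some (((none :: rest).findSome? id).getD 0) :: rest := by
      unfold doDelta_fixStep
      rw [if_pos rfl, show (0 : Int) = ((0 : Nat) : Int) by simp, PySem.List.pySetD_natCast]
      rfl
    rw [hstep]
    have := fixLoop_eq (none :: rest) rest [] (((none :: rest).findSome? id).getD 0)
    simp only [List.nil_append, List.length_nil, Nat.cast_zero, zero_add, List.map_cons,
      List.map_nil, List.singleton_append] at this
    rw [this]
    simp [fix0]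

lemma deltaOf_map_some (F : List Int) :
    ((F.map some).zip (PySem.List.slice (F.map some) (some 1) none)).map
        (fun q => q.2.getD 0 - q.1.getD 0) = deltaOf F := by
  rw [PySem.List.slice_from_one]
  unfold deltaOf
  cases F with
  | nil => simp
  | cons x F' =>
    simp only [List.map_cons, List.tail_cons]
    induction F' generalizing x with
    | nil => simp
    | cons y F'' ih => simp_all

lemma pyGetD_zero_cons (x : Option Int) (xs : List (Option Int)) :
    PySem.List.pyGetD (x :: xs) 0 none = x := by
  simpa using PySem.List.pyGetD_natCast (xs := x :: xs) (n := 0) (d := (none : Option Int))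

-- one step of A's second loop equals the character B's loop emits at the same position
lemma emoStep_eq (h a : Option Int) (t r : List (Option Int)) (prev : Int) (s : List Char) :
    doDelta_emoStep ((h :: t) ++ a :: r) s ((((h :: t : List (Option Int)).length : Int) - 1), a.getD prev - prev)
    = s ++ (if a.isNone || (((h :: t : List (Option Int)).length == 1) && h.isNone) then ['❌']
        else if a.getD prev - prev < 0 then (if a.getD 0 < 0 then ['🔻'] else ['🔽'])
        else if a.getD prev - prev > 0 then (if a.getD 0 < 0 then ['🔺'] else ['🔼'])
        else ['▪', '\uFE0F']) := by
  have habs : PySem.List.pyGetD ((h :: t) ++ a :: r) ((((h :: t : List (Option Int)).length : Int) - 1) + 1) none = a := by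
    have hc : (((h :: t : List (Option Int)).length : Int) - 1) + 1 = (((h :: t : List (Option Int)).length : Nat) : Int) := by ring
    rw [hc, PySem.List.pyGetD_natCast]
    have := getD_append_cons (h :: t) a r (none : Option Int)
    simpa using this
  have hz : PySem.List.pyGetD ((h :: t) ++ a :: r) 0 none = h := pyGetD_zero_cons h (t ++ a :: r)
  have hidx : ((((h :: t : List (Option Int)).length : Int) - 1) = 0) ↔ t = [] := by
    simp
  unfold doDelta_emoStep
  simp only []
  rw [habs, hz]
  cases a with
  | none =>
    simp
  | some v =>
    by_cases ht : t = []
    · subst ht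
      cases h with
      | none => simp [hidx]
      | some w =>
        simp only [hidx, Option.isNone_some, Option.getD_some]
        split_ifs <;> first | rfl | omega | simp_all
    · have hne : ¬ ((((h :: t : List (Option Int)).length : Int) - 1) = 0) := by
        rw [hidx]; exact ht
      have hlen : (((h :: t : List (Option Int)).length == 1)) = false := by
        simp
        exact ht
      simp only [hne, hlen, Option.getD_some, Option.isNone_some, Bool.false_and,
        Bool.and_false, Bool.or_false, false_and, or_false, false_or, if_false]
      split_ifs <;> first | rfl | omega | simp_all

lemma emoLoop_eq (rest : List (Option Int)) :
    ∀ (pre : List (Option Int)) (prev : Int) (s : List Char), pre ≠ [] →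
    (PySem.List.enumerate (deltaOf (prev :: fixRec prev rest)) ((pre.length : Int) - 1)).foldl
        (doDelta_emoStep (pre ++ rest)) s
    = s ++ doDelta_altLoop ((PySem.List.pyGetD (pre ++ rest) 0 none).isNone) (pre.length == 1) prev rest := by
  induction rest with
  | nil =>
    intro pre prev s _
    simp [deltaOf, fixRec, doDelta_altLoop]
  | cons a r ih =>
    intro pre prev s hpre
    cases pre with
    | nil => exact absurd rfl hpre
    | cons h t =>
      have hrw : deltaOf (prev :: fixRec prev (a :: r)) =
          (a.getD prev - prev) :: deltaOf (a.getD prev :: fixRec (a.getD prev) r) := by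
        simp [fixRec, deltaOf]
      rw [hrw, PySem.List.enumerate_cons, List.foldl_cons]
      have hstart : ((((h :: t : List (Option Int)).length : Int) - 1) + 1)
          = (((h :: (t ++ [a]) : List (Option Int)).length : Int) - 1) := by
        simp
      have hassoc : (h :: t) ++ a :: r = (h :: (t ++ [a])) ++ r := by simp
      rw [hstart, hassoc]
      rw [ih (h :: (t ++ [a])) (a.getD prev) _ (by simp)]
      have hF : (((h :: (t ++ [a]) : List (Option Int)).length == 1)) = false := by
        simp [beq_eq_false_iff_ne]
      rw [hF]
      have hz1 : PySem.List.pyGetD ((h :: (t ++ [a])) ++ r) 0 none = h := pyGetD_zero_cons _ _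
      rw [hz1, ← hassoc, emoStep_eq h a t r prev s]
      simp only [doDelta_altLoop]
      rw [List.append_assoc]

-- ===== VERDICT (by name: the statement is the Claim_ definition above) =====
theorem doDelta_spec : Claim_equal_doDelta := by
  intro l _
  unfold Spec_doDelta
  cases l with
  | nil => rfl
  | cons a0 rest =>
    show doDelta (a0 :: rest) = doDelta_alt (a0 :: rest)
    dsimp only [doDelta, doDelta_alt]
    rw [fixed_eq, deltaOf_map_some]
    have h := emoLoop_eq rest [a0] (fix0 (a0 :: rest)) [] (by simp)
    simp only [List.length_cons, List.length_nil, List.singleton_append] at h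
    have hz : ((0 : Nat) + 1 : Int) - 1 = 0 := by norm_num
    rw [show (((1:Nat) : Int) - 1) = (0:Int) by norm_num] at h
    rw [h]
    have : (PySem.List.pyGetD (a0 :: rest) 0 none) = a0 := by
      simpa using PySem.List.pyGetD_natCast (xs := a0 :: rest) (n := 0) (d := none)
    rw [this]
    cases a0 <;> simp [fix0]
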